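-- pv_equiv track=rewrite | github.com/mcherif004/Recuperacion | Programacion/Simulacro Examen/Examen 1º Trimestre/examenDiciembre/code/examen1_lib.py | ordenar_palabras
-- ===== SOURCE A (Python) =====
-- def ordenar_palabras(listado):
--     palabras = [[], [], []]
--
--     for palabra in listado:
--         longitud = len(palabra)
--         if longitud <= 4:
--             palabras[0].append(palabra)
--         elif 5 <= longitud <= 7:
--             palabras[1].append(palabra)
--         else:
--             palabras[2].append(palabra)
--
--     return palabras
-- ===== SOURCE B (Python) =====
-- def ordenar_palabras(listado):
--     return [[p for p in listado if len(p) <= 4],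
--             [p for p in listado if 5 <= len(p) <= 7],
--             [p for p in listado if len(p) > 7]]
-- ===== Notes on version B (the rewrite author's own statement) =====
-- stated objective: idiomatic
-- what changed: Replaces the single pass that dispatches each word into one of three mutable buckets via if/elif/else with three independent filter comprehensions, one per length band, assembled directly into the result list.
import Mathlib
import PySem

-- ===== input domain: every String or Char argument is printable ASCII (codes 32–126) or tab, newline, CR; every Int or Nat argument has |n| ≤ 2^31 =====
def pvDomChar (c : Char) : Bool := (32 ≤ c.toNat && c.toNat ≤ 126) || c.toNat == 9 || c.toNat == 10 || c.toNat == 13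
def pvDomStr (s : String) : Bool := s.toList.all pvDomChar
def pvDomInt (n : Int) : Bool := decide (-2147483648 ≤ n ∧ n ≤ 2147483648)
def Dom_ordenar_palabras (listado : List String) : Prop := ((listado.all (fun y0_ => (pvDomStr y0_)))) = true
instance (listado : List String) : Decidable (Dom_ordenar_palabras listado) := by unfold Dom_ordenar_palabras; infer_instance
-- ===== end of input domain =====

-- B replaces A's single if/elif/else dispatch loop with three independent filter passes (idiomatic decomposition; same cost).

-- ===== PORT A =====
-- single pass: fold over the words, appending each to one of three accumulated buckets
def ordenar_palabras (listado : List String) : List (List String) :=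
  let palabras :=
    listado.foldl (fun (acc : List String × List String × List String) palabra =>
      let longitud := PySem.Str.len palabra
      if longitud ≤ 4 then (acc.1 ++ [palabra], acc.2.1, acc.2.2)
      else if 5 ≤ longitud ∧ longitud ≤ 7 then (acc.1, acc.2.1 ++ [palabra], acc.2.2)
      else (acc.1, acc.2.1, acc.2.2 ++ [palabra])) ([], [], [])
  [palabras.1, palabras.2.1, palabras.2.2]

-- ===== PORT B =====
-- three independent filters, one per length band
def ordenar_palabras_alt (listado : List String) : List (List String) :=
  [listado.filter (fun p => PySem.Str.len p ≤ 4),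
   listado.filter (fun p => 5 ≤ PySem.Str.len p ∧ PySem.Str.len p ≤ 7),
   listado.filter (fun p => PySem.Str.len p > 7)]

-- ===== PRECONDITION & SPEC =====
def Spec_ordenar_palabras (listado : List String) (out : List (List String)) : Prop := out = ordenar_palabras_alt listado
instance (listado : List String) (out : List (List String)) : Decidable (Spec_ordenar_palabras listado out) := by unfold Spec_ordenar_palabras; infer_instance

-- ===== CLAIM (what is proved, stated in full; the proofs are below) =====
def Claim_equal_ordenar_palabras : Prop := ∀ (listado : List String), Dom_ordenar_palabras listado → Spec_ordenar_palabras listado (ordenar_palabras listado)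

-- ===== LEMMAS AND PROOFS =====

-- the fold with arbitrary starting buckets appends exactly the three filters
theorem ordenar_palabras_fold (listado : List String) (a b c : List String) :
    listado.foldl (fun (acc : List String × List String × List String) palabra =>
      let longitud := PySem.Str.len palabra
      if longitud ≤ 4 then (acc.1 ++ [palabra], acc.2.1, acc.2.2)
      else if 5 ≤ longitud ∧ longitud ≤ 7 then (acc.1, acc.2.1 ++ [palabra], acc.2.2)
      else (acc.1, acc.2.1, acc.2.2 ++ [palabra])) (a, b, c)
    = (a ++ listado.filter (fun p => PySem.Str.len p ≤ 4),
       b ++ listado.filter (fun p => 5 ≤ PySem.Str.len p ∧ PySem.Str.len p ≤ 7),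
       c ++ listado.filter (fun p => PySem.Str.len p > 7)) := by
  induction listado generalizing a b c with
  | nil => simp
  | cons x xs ih =>
    simp only [List.foldl_cons, List.filter_cons]
    by_cases h1 : PySem.Str.len x ≤ 4
    · rw [if_pos h1, ih,
        decide_eq_true h1,
        decide_eq_false (p := 5 ≤ PySem.Str.len x ∧ PySem.Str.len x ≤ 7) (by omega),
        decide_eq_false (p := PySem.Str.len x > 7) (by omega)]
      simp
    · by_cases h2 : 5 ≤ PySem.Str.len x ∧ PySem.Str.len x ≤ 7
      · rw [if_neg h1, if_pos h2, ih,
          decide_eq_false h1, decide_eq_true h2,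
          decide_eq_false (p := PySem.Str.len x > 7) (by omega)]
        simp
      · rw [if_neg h1, if_neg h2, ih,
          decide_eq_false h1, decide_eq_false h2,
          decide_eq_true (p := PySem.Str.len x > 7) (by omega)]
        simp

-- ===== VERDICT (by name: the statement is the Claim_ definition above) =====
theorem ordenar_palabras_spec : Claim_equal_ordenar_palabras := by
  intro listado _
  unfold Spec_ordenar_palabras ordenar_palabras ordenar_palabras_alt
  rw [ordenar_palabras_fold]
  simp only [List.nil_append]
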